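-- pv_equiv track=rewrite | github.com/hoanganhduc/course_management_toolkit | course_hoanganhduc/core.py | _flatten_menu_sections
-- ===== SOURCE A (Python) =====
-- def _flatten_menu_sections(sections):
--     entries = []
--     item_indices = []
--     # Menu numbering is presentation-only; action codes map to legacy handlers below.
--     display_to_action = {}
--     code_to_index = {}
--     display = 1
--     for section_title, items in sections:
--         entries.append({"type": "section", "label": section_title})
--         for label, action in items:
--             display_code = str(display)
--             display += 1
--             entries.append({
--                 "type": "item",
--                 "label": label,
--                 "code": display_code,
--                 "action": action,
--             })
--             item_indices.append(len(entries) - 1)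
--             display_to_action[display_code] = action
--             code_to_index[display_code] = len(entries) - 1
--     return entries, item_indices, display_to_action, code_to_index
-- ===== SOURCE B (Python) =====
-- def _flatten_menu_sections(sections):
--     # Phase 1: build only the flat entries list, assigning display codes from a running counter.
--     entries = []
--     display = 1
--     for section_title, items in sections:
--         entries.append({"type": "section", "label": section_title})
--         for label, action in items:
--             entries.append({
--                 "type": "item",
--                 "label": label,
--                 "code": str(display),
--                 "action": action,
--             })
--             display += 1
--     # Phase 2: derive the index maps from the built structure.
--     item_indices = []
--     display_to_action = {}
--     code_to_index = {}
--     for i, entry in enumerate(entries):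
--         if entry.get("type") == "item":
--             code = entry.get("code", "")
--             item_indices.append(i)
--             display_to_action[code] = entry.get("action", "")
--             code_to_index[code] = i
--     return entries, item_indices, display_to_action, code_to_index
-- ===== Notes on version B (the rewrite author's own statement) =====
-- stated objective: alternative
-- what changed: B splits the work into two passes: a first pass builds only the flat entries list with codes from a running counter, and a second pass over enumerate(entries) derives item_indices, display_to_action and code_to_index from the built structure, instead of threading all four outputs through one construction loop.
import Mathlib
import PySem

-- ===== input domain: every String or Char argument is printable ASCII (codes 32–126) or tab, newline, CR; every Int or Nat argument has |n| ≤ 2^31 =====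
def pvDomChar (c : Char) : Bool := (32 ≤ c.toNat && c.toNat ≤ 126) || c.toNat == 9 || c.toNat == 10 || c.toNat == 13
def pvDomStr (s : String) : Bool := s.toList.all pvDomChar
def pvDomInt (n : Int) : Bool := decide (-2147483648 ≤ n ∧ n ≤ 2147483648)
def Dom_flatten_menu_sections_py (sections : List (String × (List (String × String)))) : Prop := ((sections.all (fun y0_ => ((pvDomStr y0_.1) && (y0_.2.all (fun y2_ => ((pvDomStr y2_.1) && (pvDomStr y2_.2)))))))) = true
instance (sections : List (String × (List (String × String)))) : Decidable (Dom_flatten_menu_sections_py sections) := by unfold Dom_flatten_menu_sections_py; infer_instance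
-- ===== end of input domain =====

-- B restructures A's single construction loop into two passes: pass 1 builds only the flat
-- entries list with codes from a running counter; pass 2 derives the three index maps from
-- the built entries (objective: alternative decomposition, same cost). Same return value.

-- ===== PORT A =====
-- the dict literal {"type": "section", "label": t}
def pvSecDict (t : String) : List (String × String) := [("type", "section"), ("label", t)]
-- the dict literal {"type": "item", "label": l, "code": code, "action": a}
def pvItemDict (l code a : String) : List (String × String) :=
  [("type", "item"), ("label", l), ("code", code), ("action", a)]

-- A's loop state: (entries, item_indices, display_to_action, code_to_index, display)
def pvAItem
    (st : List (List (String × String)) × List Int × PySem.Dict String String × PySem.Dict String Int × Int)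
    (it : String × String) :
    List (List (String × String)) × List Int × PySem.Dict String String × PySem.Dict String Int × Int :=
  let code := PySem.Int.toStr st.2.2.2.2        -- display_code = str(display); display += 1 below
  let entries := st.1 ++ [pvItemDict it.1 code it.2]
  (entries,
   st.2.1 ++ [(entries.length : Int) - 1],      -- item_indices.append(len(entries) - 1)
   st.2.2.1.insert code it.2,                   -- display_to_action[display_code] = action
   st.2.2.2.1.insert code ((entries.length : Int) - 1),
   st.2.2.2.2 + 1)

def pvASec
    (st : List (List (String × String)) × List Int × PySem.Dict String String × PySem.Dict String Int × Int)
    (sec : String × (List (String × String))) :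
    List (List (String × String)) × List Int × PySem.Dict String String × PySem.Dict String Int × Int :=
  sec.2.foldl pvAItem (st.1 ++ [pvSecDict sec.1], st.2.1, st.2.2.1, st.2.2.2.1, st.2.2.2.2)

def flatten_menu_sections_py (sections : List (String × (List (String × String)))) :
    (List (List (String × String))) × List Int × (List (String × String)) × (List (String × Int)) :=
  let st := sections.foldl pvASec ([], [], PySem.Dict.empty, PySem.Dict.empty, 1)
  (st.1, st.2.1, st.2.2.1.items, st.2.2.2.1.items)

-- ===== PORT B =====
-- phase 1 state: (entries, display)
def pvBItem (st : List (List (String × String)) × Int) (it : String × String) :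
    List (List (String × String)) × Int :=
  (st.1 ++ [pvItemDict it.1 (PySem.Int.toStr st.2) it.2], st.2 + 1)

def pvBSec (st : List (List (String × String)) × Int) (sec : String × (List (String × String))) :
    List (List (String × String)) × Int :=
  sec.2.foldl pvBItem (st.1 ++ [pvSecDict sec.1], st.2)

-- phase 2 body: for (i, entry) — if entry.get("type") == "item": record index and maps
def pvBStep (acc : List Int × PySem.Dict String String × PySem.Dict String Int)
    (p : Int × List (String × String)) :
    List Int × PySem.Dict String String × PySem.Dict String Int :=
  let e := PySem.Dict.mk p.2
  if e.get? "type" == some "item" then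
    let code := e.getD "code" ""
    (acc.1 ++ [p.1], acc.2.1.insert code (e.getD "action" ""), acc.2.2.insert code p.1)
  else acc

def flatten_menu_sections_py_alt (sections : List (String × (List (String × String)))) :
    (List (List (String × String))) × List Int × (List (String × String)) × (List (String × Int)) :=
  let e := sections.foldl pvBSec ([], 1)
  let m := (PySem.List.enumerate e.1 0).foldl pvBStep ([], PySem.Dict.empty, PySem.Dict.empty)
  (e.1, m.1, m.2.1.items, m.2.2.items)

-- ===== PRECONDITION & SPEC =====
def Spec_flatten_menu_sections_py (sections : List (String × (List (String × String)))) (out : (List (List (String × String))) × List Int × (List (String × String)) × (List (String × Int))) : Prop := out = flatten_menu_sections_py_alt sections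
instance (sections : List (String × (List (String × String)))) (out : (List (List (String × String))) × List Int × (List (String × String)) × (List (String × Int))) : Decidable (Spec_flatten_menu_sections_py sections out) := by unfold Spec_flatten_menu_sections_py; infer_instance

-- ===== CLAIM (what is proved, stated in full; the proofs are below) =====
def Claim_equal_flatten_menu_sections_py : Prop := ∀ (sections : List (String × (List (String × String)))), Dom_flatten_menu_sections_py sections → Spec_flatten_menu_sections_py sections (flatten_menu_sections_py sections)

-- ===== LEMMAS AND PROOFS =====

-- the new entries contributed by a run of items starting at display counter d
def pvItemsNew : List (String × String) → Int → List (List (String × String))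
  | [], _ => []
  | it :: its, d => pvItemDict it.1 (PySem.Int.toStr d) it.2 :: pvItemsNew its (d + 1)

def pvTotal : List (String × (List (String × String))) → Int
  | [] => 0
  | s :: ss => (s.2.length : Int) + pvTotal ss

-- the new entries contributed by a run of sections starting at display counter d
def pvNew : List (String × (List (String × String))) → Int → List (List (String × String))
  | [], _ => []
  | s :: ss, d => (pvSecDict s.1 :: pvItemsNew s.2 d) ++ pvNew ss (d + (s.2.length : Int))

-- phase 2 as structural recursion with an explicit index
def pvScan : List (List (String × String)) → Int →
    (List Int × PySem.Dict String String × PySem.Dict String Int) →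
    (List Int × PySem.Dict String String × PySem.Dict String Int)
  | [], _, acc => acc
  | e :: es, k, acc => pvScan es (k + 1) (pvBStep acc (k, e))

theorem pvScan_eq_enumFold (es : List (List (String × String))) (k : Int)
    (acc : List Int × PySem.Dict String String × PySem.Dict String Int) :
    (PySem.List.enumerate es k).foldl pvBStep acc = pvScan es k acc := by
  induction es generalizing k acc with
  | nil => simp [PySem.List.enumerate_nil, pvScan]
  | cons e es ih => simp [PySem.List.enumerate_cons, pvScan, ih]

theorem pvScan_append (xs ys : List (List (String × String))) (k : Int)
    (acc : List Int × PySem.Dict String String × PySem.Dict String Int) :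
    pvScan (xs ++ ys) k acc = pvScan ys (k + (xs.length : Int)) (pvScan xs k acc) := by
  induction xs generalizing k acc with
  | nil => simp [pvScan]
  | cons x xs ih =>
      simp only [List.cons_append, pvScan, ih, List.length_cons]
      rw [show k + 1 + (xs.length : Int) = k + ((xs.length : Nat) + 1 : Nat) from by push_cast; ring]

theorem pvBStep_sec (acc : List Int × PySem.Dict String String × PySem.Dict String Int)
    (k : Int) (t : String) : pvBStep acc (k, pvSecDict t) = acc := by
  simp [pvBStep, pvSecDict, PySem.Dict.get?]

theorem pvBStep_item (acc : List Int × PySem.Dict String String × PySem.Dict String Int)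
    (k : Int) (l code a : String) :
    pvBStep acc (k, pvItemDict l code a) =
      (acc.1 ++ [k], acc.2.1.insert code a, acc.2.2.insert code k) := by
  simp [pvBStep, pvItemDict, PySem.Dict.get?, PySem.Dict.getD]

theorem pvBItem_foldl (its : List (String × String)) (ents : List (List (String × String))) (d : Int) :
    its.foldl pvBItem (ents, d) = (ents ++ pvItemsNew its d, d + (its.length : Int)) := by
  induction its generalizing ents d with
  | nil => simp [pvItemsNew]
  | cons it its ih =>
      simp only [List.foldl_cons, pvBItem, ih, pvItemsNew, List.append_assoc,
        List.singleton_append, List.length_cons, Prod.mk.injEq]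
      exact ⟨trivial, by push_cast; ring⟩

theorem pvBSec_foldl (ss : List (String × (List (String × String))))
    (ents : List (List (String × String))) (d : Int) :
    ss.foldl pvBSec (ents, d) = (ents ++ pvNew ss d, d + pvTotal ss) := by
  induction ss generalizing ents d with
  | nil => simp [pvNew, pvTotal]
  | cons s ss ih =>
      simp only [List.foldl_cons, pvBSec, pvBItem_foldl, ih, pvNew, pvTotal, Prod.mk.injEq]
      exact ⟨by simp, by ring⟩

theorem pvAItem_step (ents : List (List (String × String))) (inds : List Int)
    (d2a : PySem.Dict String String) (c2i : PySem.Dict String Int) (d : Int)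
    (it : String × String) :
    pvAItem (ents, inds, d2a, c2i, d) it =
      (ents ++ [pvItemDict it.1 (PySem.Int.toStr d) it.2], inds ++ [(ents.length : Int)],
       d2a.insert (PySem.Int.toStr d) it.2, c2i.insert (PySem.Int.toStr d) (ents.length : Int),
       d + 1) := by
  have h : ((ents ++ [pvItemDict it.1 (PySem.Int.toStr d) it.2]).length : Int) - 1
      = (ents.length : Int) := by simp
  simp only [pvAItem, h]

theorem pvAItem_foldl (its : List (String × String)) (ents : List (List (String × String)))
    (inds : List Int) (d2a : PySem.Dict String String) (c2i : PySem.Dict String Int) (d : Int) :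
    its.foldl pvAItem (ents, inds, d2a, c2i, d) =
      (ents ++ pvItemsNew its d,
       (pvScan (pvItemsNew its d) (ents.length : Int) (inds, d2a, c2i)).1,
       (pvScan (pvItemsNew its d) (ents.length : Int) (inds, d2a, c2i)).2.1,
       (pvScan (pvItemsNew its d) (ents.length : Int) (inds, d2a, c2i)).2.2,
       d + (its.length : Int)) := by
  induction its generalizing ents inds d2a c2i d with
  | nil => simp [pvItemsNew, pvScan]
  | cons it its ih =>
      rw [List.foldl_cons, pvAItem_step, ih]
      have hl : (((ents ++ [pvItemDict it.1 (PySem.Int.toStr d) it.2]).length : Nat) : Int)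
          = (ents.length : Int) + 1 := by simp
      simp only [pvItemsNew, pvScan, pvBStep_item, hl, List.append_assoc,
        List.singleton_append, List.length_cons, Prod.mk.injEq]
      exact ⟨trivial, trivial, trivial, trivial, by push_cast; ring⟩

theorem pvASec_foldl (ss : List (String × (List (String × String))))
    (ents : List (List (String × String)))
    (inds : List Int) (d2a : PySem.Dict String String) (c2i : PySem.Dict String Int) (d : Int) :
    ss.foldl pvASec (ents, inds, d2a, c2i, d) =
      (ents ++ pvNew ss d,
       (pvScan (pvNew ss d) (ents.length : Int) (inds, d2a, c2i)).1,
       (pvScan (pvNew ss d) (ents.length : Int) (inds, d2a, c2i)).2.1,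
       (pvScan (pvNew ss d) (ents.length : Int) (inds, d2a, c2i)).2.2,
       d + pvTotal ss) := by
  induction ss generalizing ents inds d2a c2i d with
  | nil => simp [pvNew, pvScan, pvTotal]
  | cons s ss ih =>
      rw [List.foldl_cons]
      simp only [pvASec]
      rw [pvAItem_foldl, ih]
      simp only [pvNew, pvScan, pvBStep_sec, pvScan_append, pvTotal, List.append_assoc,
        List.cons_append, List.length_append, List.length_cons, List.length_nil,
        Nat.cast_add, Nat.cast_one, Nat.cast_zero, Prod.mk.injEq]
      rw [show (ents.length : Int) + (0 + 1) = (ents.length : Int) + 1 from by ring,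
          show (ents.length : Int) + (0 + ((pvItemsNew s.2 d).length : Int) + 1)
              = (ents.length : Int) + 1 + ((pvItemsNew s.2 d).length : Int) from by ring]
      exact ⟨by simp, rfl, rfl, rfl, by ring⟩

-- ===== VERDICT (by name: the statement is the Claim_ definition above) =====
theorem flatten_menu_sections_py_spec : Claim_equal_flatten_menu_sections_py := by
  intro sections _
  unfold Spec_flatten_menu_sections_py flatten_menu_sections_py flatten_menu_sections_py_alt
  simp only [pvASec_foldl, pvBSec_foldl, pvScan_eq_enumFold, List.nil_append,
    List.length_nil, Nat.cast_zero]
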